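-- pv_equiv track=rewrite | github.com/ZhengElvisLONG/UNSW-Master-of-IT-Code-of-Elvis | 2025T1/9021/EXAMS/2024T3finalCPURestore/2024T3finalCPURestore/Q1.py | f
-- ===== SOURCE A (Python) =====
-- def f(start=1, nb_of_terms=1):
--     '''
--     >>> f()
--     ((1,), (1,))
--     >>> f(1, 2)
--     ((1, 2), (2, 1))
--     >>> f(1, 3)
--     ((1, 2, 4), (4, 2, 1))
--     >>> f(1, 4)
--     ((1, 2, 4, 7), (7, 4, 2, 1))
--     >>> f(-10)
--     ((-10,), (-10,))
--     >>> f(-10, 2)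
--     ((-10, -9), (-9, -10))
--     '''
--     # Replace the return statement above with your code.
--     result = []
--     gap = 1
--     for _ in range(nb_of_terms):
--         result.append(start)
--         start += gap
--         gap += 1 # 把gap + 1
--     result = (tuple(result), tuple(result[::-1])) # 元组化并倒置输出
--     return result
-- ===== SOURCE B (Python) =====
-- def f(start=1, nb_of_terms=1):
--     # closed form: k-th element = start + k*(k+1)//2 (triangular offset), no running state
--     forward = tuple(start + k * (k + 1) // 2 for k in range(nb_of_terms))
--     return (forward, forward[::-1])
-- ===== Notes on version B (the rewrite author's own statement) =====
-- stated objective: idiomatic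
-- what changed: Replaces the stateful loop maintaining a running start and incrementing gap with a direct per-index closed form start + k*(k+1)//2 mapped over range, then reversed.
import Mathlib
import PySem

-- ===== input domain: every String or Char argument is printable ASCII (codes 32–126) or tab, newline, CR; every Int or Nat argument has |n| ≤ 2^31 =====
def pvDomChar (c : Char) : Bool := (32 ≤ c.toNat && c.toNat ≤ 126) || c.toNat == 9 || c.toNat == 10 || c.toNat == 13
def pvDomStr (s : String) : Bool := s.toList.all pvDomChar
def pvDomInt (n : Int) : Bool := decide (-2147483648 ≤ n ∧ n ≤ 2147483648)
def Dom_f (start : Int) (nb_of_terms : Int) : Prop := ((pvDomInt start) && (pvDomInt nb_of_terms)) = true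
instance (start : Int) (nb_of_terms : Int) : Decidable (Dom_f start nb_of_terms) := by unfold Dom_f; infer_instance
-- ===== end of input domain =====

-- B computes each element by the closed form start + k*(k+1)//2 instead of A's running start/gap state.
-- ===== PORT A =====
def fStep (s : List Int × Int × Int) (_ : Int) : List Int × Int × Int :=
  (s.1 ++ [s.2.1], s.2.1 + s.2.2, s.2.2 + 1)

def f (start : Int) (nb_of_terms : Int) : List Int × List Int :=
  let st := (PySem.List.pyRange 0 nb_of_terms 1).foldl fStep ([], start, 1)
  (st.1, st.1.reverse)

-- ===== PORT B =====
def f_alt (start : Int) (nb_of_terms : Int) : List Int × List Int :=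
  let forward := (PySem.List.pyRange 0 nb_of_terms 1).map
    (fun k => start + PySem.Int.floordiv (k * (k + 1)) 2)
  (forward, forward.reverse)

-- ===== PRECONDITION & SPEC =====
def Spec_f (start : Int) (nb_of_terms : Int) (out : List Int × List Int) : Prop := out = f_alt start nb_of_terms
instance (start : Int) (nb_of_terms : Int) (out : List Int × List Int) : Decidable (Spec_f start nb_of_terms out) := by unfold Spec_f; infer_instance

-- ===== CLAIM (what is proved, stated in full; the proofs are below) =====
def Claim_equal_f : Prop := ∀ (start : Int) (nb_of_terms : Int), Dom_f start nb_of_terms → Spec_f start nb_of_terms (f start nb_of_terms)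

-- ===== LEMMAS AND PROOFS =====

-- ===== VERDICT (by name: the statement is the Claim_ definition above) =====
-- triangular number: tri k = 0+1+...+(k-1)
def tri (k : Nat) : Int := ((k * (k - 1)) / 2 : Nat)

theorem tri_succ (k : Nat) : tri (k + 1) = tri k + k := by
  unfold tri
  have h2 : (k + 1) * (k + 1 - 1) / 2 = k * (k - 1) / 2 + k := by
    rcases k with _ | m
    · rfl
    · simp only [Nat.add_sub_cancel]
      have h : (m + 1 + 1) * (m + 1) = (m + 1) * m + (m + 1) * 2 := by ring
      rw [h, Nat.add_mul_div_right _ _ (by omega : 0 < 2)]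
  rw [h2]; push_cast; ring

theorem map_shift (m : Nat) (s g : Int) :
    (List.range (m + 1)).map (fun k => s + k * g + tri k) =
      s :: (List.range m).map (fun k => (s + g) + k * (g + 1) + tri k) := by
  rw [List.range_succ_eq_map]
  simp only [List.map_cons, List.map_map, Function.comp_def]
  simp only [List.cons.injEq]
  refine ⟨by simp [tri], ?_⟩
  apply List.map_congr_left
  intro k _
  rw [tri_succ]; push_cast; ring

theorem fold_invariant (l : List Int) (s g : Int) (acc : List Int) :
    l.foldl fStep (acc, s, g) =
      (acc ++ (List.range l.length).map (fun k => s + k * g + tri k),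
       s + l.length * g + tri l.length, g + l.length) := by
  induction l generalizing acc s g with
  | nil => simp [tri]
  | cons x rest ih =>
    simp only [List.foldl_cons, List.length_cons]
    rw [show fStep (acc, s, g) x = (acc ++ [s], s + g, g + 1) from rfl, ih, map_shift]
    simp only [Prod.mk.injEq]
    refine ⟨by simp, by rw [tri_succ]; push_cast; ring, by push_cast; ring⟩

theorem elem_closed (k : Nat) :
    (k : Int) * 1 + tri k = PySem.Int.floordiv ((k : Int) * ((k : Int) + 1)) 2 := by
  have h1 : (k : Int) * ((k : Int) + 1) = ((k * (k + 1) : Nat) : Int) := by push_cast; ring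
  rw [h1, show ((2 : Int)) = ((2 : Nat) : Int) from rfl, PySem.Int.floordiv_natCast]
  unfold tri
  have h2 : k * (k + 1) / 2 = k * (k - 1) / 2 + k := by
    rcases k with _ | m
    · rfl
    · simp only [Nat.add_sub_cancel]
      have h : (m + 1) * (m + 1 + 1) = (m + 1) * m + (m + 1) * 2 := by ring
      rw [h, Nat.add_mul_div_right _ _ (by omega : 0 < 2)]
  rw [h2]; push_cast; ring

-- ===== VERDICT =====
theorem f_spec : Claim_equal_f := by
  intro start nb _
  unfold Spec_f f f_alt
  rw [PySem.List.pyRange_one]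
  rw [fold_invariant]
  simp only [List.nil_append, List.length_map, List.length_range, List.map_map,
    Function.comp_def, Int.sub_zero, Int.zero_add]
  have hm : (List.range nb.toNat).map (fun (k : Nat) => start + (k : Int) * 1 + tri k) =
      (List.range nb.toNat).map (fun (k : Nat) => start + PySem.Int.floordiv ((k : Int) * ((k : Int) + 1)) 2) := by
    apply List.map_congr_left
    intro k _
    rw [add_assoc, elem_closed]
  rw [hm]
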